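-- pv_equiv track=rewrite | github.com/NottsNano/pyRabani | CNN/utils.py | zigzag_product
-- ===== SOURCE A (Python) =====
-- import itertools
--
-- def zigzag_product(iterable_1, iterable_2):
--     """
--     Zigzag along two iterables to avoid discontinuities when indexing windows
--
--     Parameters
--     ----------
--     iterable_1 : iterable
--     iterable_2 : iterable
--
--     Examples
--     --------
--     Without zigzagging
--     >>> list(itertools.product([1,2,3],[1,2,3]))
--     [(1,1), (1,2), (1,3), (2,1), (2,2), (2,3), (3,1), (3,2), (3,3)]
--
--     With zigzagging
--     >>> zigzag_product([1,2,3],[1,2,3])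
--     [(1,1), (1,2), (1,3), (2,3), (2,2), (2,1), (3,1), (3,2), (3,3)]
--     """
--
--     assert len(iterable_1) == len(iterable_2)
--     window_length = len(iterable_1)
--
--     iterated = list(itertools.product(iterable_1, iterable_2))
--     new_iterated = []
--     for cnt, i in enumerate(range(0, len(iterated), window_length)):
--         if cnt % 2 == 1:
--             new_iterated += list(reversed(iterated[i:i + window_length]))
--         else:
--             new_iterated += iterated[i:i + window_length]
--
--     return new_iterated
-- ===== SOURCE B (Python) =====
-- def zigzag_product(iterable_1, iterable_2):
--     """Boustrophedon product by index arithmetic: a single flat loop over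
--     k in range(n*n); pair k is (xs[k//n], ys[k%n]) with the column mirrored
--     on odd rows."""
--     assert len(iterable_1) == len(iterable_2)
--     xs = list(iterable_1)
--     ys = list(iterable_2)
--     n = len(xs)
--     out = []
--     for k in range(n * n):
--         q, r = divmod(k, n)
--         out.append((xs[q], ys[n - 1 - r] if q % 2 else ys[r]))
--     return out
-- ===== Notes on version B (the rewrite author's own statement) =====
-- stated objective: alternative
-- what changed: A materializes the full itertools.product list and then re-slices it into windows, reversing every other slice; B never builds rows or reverses anything: one flat loop over k in range(n*n) computes each pair directly by index arithmetic, (xs[k//n], ys[k%n]) with the column index mirrored to n-1-k%n on odd rows.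
-- crash fix: On two empty iterables A raises ValueError (range() step 0); B returns []. — e.g. on zigzag_product([], []): A raises ValueError, B returns []
import Mathlib
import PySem

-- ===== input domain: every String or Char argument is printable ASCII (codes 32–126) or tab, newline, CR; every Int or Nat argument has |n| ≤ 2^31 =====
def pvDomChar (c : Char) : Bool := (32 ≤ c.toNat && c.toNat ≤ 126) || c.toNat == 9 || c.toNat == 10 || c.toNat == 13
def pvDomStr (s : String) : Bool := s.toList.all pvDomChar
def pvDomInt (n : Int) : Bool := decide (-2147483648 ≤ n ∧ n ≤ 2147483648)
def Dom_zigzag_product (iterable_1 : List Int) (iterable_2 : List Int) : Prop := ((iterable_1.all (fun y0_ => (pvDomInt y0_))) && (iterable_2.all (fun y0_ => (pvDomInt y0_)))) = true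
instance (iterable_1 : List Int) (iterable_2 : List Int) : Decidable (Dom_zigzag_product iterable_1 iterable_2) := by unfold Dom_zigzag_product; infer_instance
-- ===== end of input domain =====

-- B replaces A's product-then-slice-and-reverse with a single flat index loop:
-- pair k of the boustrophedon product is computed directly as (xs[k//n], ys[k%n])
-- with the column mirrored on odd rows (objective: alternative; same cost).


-- ===== PORT A =====
-- 'assert len(...) == len(...)' raises outside Pre_; itertools.product is the nested pair list.
def zigzag_product (iterable_1 : List Int) (iterable_2 : List Int) : List (Int × Int) :=
  let window_length : Int := PySem.List.len iterable_1
  let iterated : List (Int × Int) := iterable_1.flatMap (fun x => iterable_2.map (fun y => (x, y)))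
  let new_iterated : List (Int × Int) :=
    (PySem.List.enumerate (PySem.List.pyRange 0 (PySem.List.len iterated) window_length) 0).foldl
      (fun acc ci =>
        if PySem.Int.mod ci.1 2 == 1 then
          acc ++ (PySem.List.slice iterated (some ci.2) (some (ci.2 + window_length))).reverse
        else
          acc ++ PySem.List.slice iterated (some ci.2) (some (ci.2 + window_length))) []
  new_iterated

-- ===== PORT B =====
-- indices k//n, k%n, n-1-k%n are always in range under Pre_, so pyGetD's default is never read.
def zigzag_product_alt (iterable_1 : List Int) (iterable_2 : List Int) : List (Int × Int) :=
  let xs : List Int := iterable_1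
  let ys : List Int := iterable_2
  let n : Int := PySem.List.len xs
  (PySem.List.pyRange 0 (n * n) 1).foldl
    (fun out k =>
      let q : Int := PySem.Int.floordiv k n
      let r : Int := PySem.Int.mod k n
      out ++ [(PySem.List.pyGetD xs q 0,
               if PySem.Int.mod q 2 == 1 then PySem.List.pyGetD ys (n - 1 - r) 0
               else PySem.List.pyGetD ys r 0)]) []

-- ===== PRECONDITION & SPEC =====
-- Pre_ excludes length mismatches (A's assert raises AssertionError) and the empty pair of
-- lists (range(0, 0, 0) raises ValueError in A).
def Pre_zigzag_product (iterable_1 : List Int) (iterable_2 : List Int) : Prop :=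
  iterable_1.length = iterable_2.length ∧ iterable_1 ≠ []
instance (iterable_1 : List Int) (iterable_2 : List Int) : Decidable (Pre_zigzag_product iterable_1 iterable_2) := by unfold Pre_zigzag_product; infer_instance
def pvWitness_zigzag_product : List Int × List Int := ([1, 2, 3], [4, 5, 6])

-- On two empty iterables A raises ValueError (range() step 0); B returns [].
def Raises_zigzag_product (iterable_1 : List Int) (iterable_2 : List Int) : Prop :=
  iterable_1 = [] ∧ iterable_2 = []
instance (iterable_1 : List Int) (iterable_2 : List Int) : Decidable (Raises_zigzag_product iterable_1 iterable_2) := by unfold Raises_zigzag_product; infer_instance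
def pvRaiseWitness_zigzag_product : List Int × List Int := ([], [])
def pvRaiseWitnessOut_zigzag_product : List (Int × Int) := []

def Spec_zigzag_product (iterable_1 : List Int) (iterable_2 : List Int) (out : List (Int × Int)) : Prop := out = zigzag_product_alt iterable_1 iterable_2
instance (iterable_1 : List Int) (iterable_2 : List Int) (out : List (Int × Int)) : Decidable (Spec_zigzag_product iterable_1 iterable_2 out) := by unfold Spec_zigzag_product; infer_instance

-- ===== CLAIM (what is proved, stated in full; the proofs are below) =====
def Claim_equal_zigzag_product : Prop := ∀ (iterable_1 : List Int) (iterable_2 : List Int), Dom_zigzag_product iterable_1 iterable_2 → Pre_zigzag_product iterable_1 iterable_2 → Spec_zigzag_product iterable_1 iterable_2 (zigzag_product iterable_1 iterable_2)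
def Claim_raises_zigzag_product : Prop := (∀ (iterable_1 : List Int) (iterable_2 : List Int), Dom_zigzag_product iterable_1 iterable_2 → Raises_zigzag_product iterable_1 iterable_2 → ¬ Pre_zigzag_product iterable_1 iterable_2) ∧ (Dom_zigzag_product (pvRaiseWitness_zigzag_product.1) (pvRaiseWitness_zigzag_product.2) ∧ Raises_zigzag_product (pvRaiseWitness_zigzag_product.1) (pvRaiseWitness_zigzag_product.2) ∧ zigzag_product_alt (pvRaiseWitness_zigzag_product.1) (pvRaiseWitness_zigzag_product.2) = pvRaiseWitnessOut_zigzag_product)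

-- ===== LEMMAS AND PROOFS =====

-- the common boustrophedon shape both proofs target: row q of the product, reversed when q is odd
def pvZig (l1 l2 : List Int) : List (Int × Int) :=
  (List.range l1.length).flatMap (fun q =>
    let row := l2.map (fun y => (l1.getD q 0, y))
    if q % 2 = 1 then row.reverse else row)

-- range(0, m*n, n) for 0 < n is [0, n, 2n, …, (m-1)n]
lemma pyRange_step_mul (m n : Nat) (hn : 0 < n) :
    PySem.List.pyRange 0 ((m * n : Nat) : Int) ((n : Nat) : Int)
      = (List.range m).map (fun k => ((n * k : Nat) : Int)) := by
  rw [PySem.List.pyRange_of_pos 0 ((m * n : Nat) : Int) (by exact_mod_cast hn)]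
  have hdiv : ((((m * n : Nat) : Int) - 0 + (n : Int) - 1) / (n : Int)).toNat = m := by
    have h1 : (((m * n : Nat) : Int) - 0 + (n : Int) - 1) = ((m * n + n - 1 : Nat) : Int) := by
      push_cast; omega
    rw [h1, ← Int.natCast_ediv, Int.toNat_natCast]
    have h2 : m * n + n - 1 = n * m + (n - 1) := by rw [Nat.mul_comm]; omega
    rw [h2, Nat.mul_add_div hn, Nat.div_eq_of_lt (by omega)]
    omega
  have hif : (if (0 : Int) < ((m * n : Nat) : Int) then ((((m * n : Nat) : Int) - 0 + (n : Int) - 1) / (n : Int)).toNat else 0) = m := by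
    rcases Nat.eq_zero_or_pos m with hm | hm
    · subst hm; simp
    · rw [if_pos (by exact_mod_cast Nat.mul_pos hm hn), hdiv]
  rw [hif]
  refine List.map_congr_left (fun k _ => ?_)
  push_cast; ring

lemma enumerate_map {α β : Type} (f : α → β) (l : List α) (s : Int) :
    PySem.List.enumerate (l.map f) s = (PySem.List.enumerate l s).map (fun p => (p.1, f p.2)) := by
  induction l generalizing s with
  | nil => simp [PySem.List.enumerate_nil]
  | cons x xs ih => simp [PySem.List.enumerate_cons, ih]

-- the k-th window of the flattened product is the k-th row
lemma window_eq_row (l2 : List Int) (l1 : List Int) (k : Nat) (hk : k < l1.length) :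
    List.take l2.length
        (List.drop (l2.length * k) (l1.flatMap (fun x => l2.map (fun y => (x, y)))))
      = l2.map (fun y => (l1[k], y)) := by
  induction l1 generalizing k with
  | nil => simp at hk
  | cons x xs ih =>
    cases k with
    | zero =>
      simp only [Nat.mul_zero, List.drop_zero, List.flatMap_cons]
      rw [List.take_left' (by simp)]
      simp
    | succ k =>
      have hk' : k < xs.length := by simpa using hk
      have : l2.length * (k + 1) = l2.length + l2.length * k := by ring
      rw [this, List.flatMap_cons, List.drop_append]
      simp only [List.length_map, Nat.add_sub_cancel_left]
      rw [List.drop_eq_nil_of_le (by simp), List.nil_append]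
      simpa using ih k hk'

lemma length_flatMap_rows (l1 l2 : List Int) :
    (l1.flatMap (fun x => l2.map (fun y => (x, y)))).length = l1.length * l2.length := by
  induction l1 with
  | nil => simp
  | cons x xs ih => simp [ih]; ring

-- range(a*m) split into a rows of m consecutive indices
lemma range_mul_flatMap (m : Nat) : ∀ a : Nat,
    List.range (a * m) = (List.range a).flatMap (fun q => (List.range m).map (fun r => q * m + r)) := by
  intro a
  induction a with
  | zero => simp
  | succ a ih =>
    rw [Nat.succ_mul, List.range_add, ih, List.range_succ, List.flatMap_append]
    simp

-- mirrored map over range n is the reverse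
lemma map_range_mirror {α : Type} (g : Nat → α) (n : Nat) :
    (List.range n).map (fun r => g (n - 1 - r)) = ((List.range n).map g).reverse := by
  apply List.ext_getElem
  · simp
  · intro i h1 h2
    simp only [List.length_map, List.length_range] at h1
    simp only [List.getElem_reverse, List.getElem_map, List.getElem_range,
      List.length_map, List.length_range]

lemma map_getD_range (l : List Int) (x0 : Int) :
    (List.range l.length).map (fun r => (x0, l.getD r 0)) = l.map (fun y => (x0, y)) := by
  apply List.ext_getElem
  · simp
  · intro i h1 h2
    have hi : i < l.length := by simpa using h1
    simp [List.getElem?_eq_getElem hi]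

-- A equals the boustrophedon shape
lemma A_eq_zig (l1 l2 : List Int) (hlen : l1.length = l2.length) (hne : l1 ≠ []) :
    zigzag_product l1 l2 = pvZig l1 l2 := by
  unfold zigzag_product pvZig
  simp only [PySem.List.len_eq]
  set n := l2.length with hn_def
  have hn : 0 < n := by
    have h1 : 0 < l1.length := List.length_pos_iff.mpr hne
    omega
  set row : Int → List (Int × Int) := fun x => l2.map (fun y => (x, y)) with hrow
  set iterated := l1.flatMap row with hiter
  have hlit : iterated.length = l1.length * n := length_flatMap_rows l1 l2
  rw [show (fun acc (ci : Int × Int) =>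
        if PySem.Int.mod ci.1 2 == 1 then
          acc ++ (PySem.List.slice iterated (some ci.2) (some (ci.2 + (l1.length : Int)))).reverse
        else
          acc ++ PySem.List.slice iterated (some ci.2) (some (ci.2 + (l1.length : Int))))
      = (fun acc (ci : Int × Int) =>
        acc ++ (if PySem.Int.mod ci.1 2 == 1
          then (PySem.List.slice iterated (some ci.2) (some (ci.2 + (l1.length : Int)))).reverse
          else PySem.List.slice iterated (some ci.2) (some (ci.2 + (l1.length : Int)))))
      from funext fun acc => funext fun ci => by split <;> rfl]
  rw [PySem.List.foldl_append_eq_flatMap]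
  simp only [List.nil_append, List.flatMap_def]
  congr 1
  have hrange : PySem.List.pyRange 0 (iterated.length : Int) (l1.length : Int)
      = (List.range l1.length).map (fun k => ((n * k : Nat) : Int)) := by
    rw [hlit, hlen]
    exact pyRange_step_mul n n hn
  rw [hrange, enumerate_map]
  simp only [List.map_map]
  apply List.ext_getElem
  · simp [PySem.List.length_enumerate]
  · intro k hk1 hk2
    have hkm : k < l1.length := by
      simpa [PySem.List.length_enumerate] using hk1
    simp only [List.getElem_map, Function.comp_apply, PySem.List.getElem_enumerate,
      List.getElem_range, zero_add]
    have hslice : PySem.List.slice iterated (some ((n * k : Nat) : Int))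
        (some (((n * k : Nat) : Int) + (l1.length : Int)))
        = row l1[k] := by
      rw [hlen]
      rw [PySem.List.slice_natCast_add iterated (n * k) n]
      exact window_eq_row l2 l1 k hkm
    rw [hslice]
    have hgetD : l1.getD k 0 = l1[k] := List.getD_eq_getElem l1 0 hkm
    have hmod : PySem.Int.mod ((k : Nat) : Int) 2 = ((k % 2 : Nat) : Int) := by
      exact_mod_cast PySem.Int.mod_natCast k 2
    by_cases hodd : k % 2 = 1
    · rw [if_pos (by rw [hmod, hodd]; rfl), if_pos hodd]
      rw [← hgetD]
    · rw [if_neg (by rw [hmod]; simp; omega), if_neg hodd]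
      rw [← hgetD]

-- B equals the boustrophedon shape
lemma B_eq_zig (l1 l2 : List Int) (hlen : l1.length = l2.length) :
    zigzag_product_alt l1 l2 = pvZig l1 l2 := by
  unfold zigzag_product_alt pvZig
  simp only [PySem.List.len_eq]
  set m := l1.length with hm_def
  rw [PySem.List.foldl_append_singleton_eq_map]
  have hsq : ((m : Int) * (m : Int)) = ((m * m : Nat) : Int) := by push_cast; ring
  rw [hsq, PySem.List.pyRange_zero_natCast, range_mul_flatMap m m]
  simp only [List.nil_append, List.map_flatMap, List.map_map]
  refine List.flatMap_congr ?_
  intro q hq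
  have hqm : q < m := List.mem_range.mp hq
  have hm : 0 < m := by omega
  have hstep : ∀ r : Nat, r < m →
      (PySem.Int.floordiv ((q * m + r : Nat) : Int) ((m : Nat) : Int) = ((q : Nat) : Int)
       ∧ PySem.Int.mod ((q * m + r : Nat) : Int) ((m : Nat) : Int) = ((r : Nat) : Int)) := by
    intro r hr
    constructor
    · rw [PySem.Int.floordiv_natCast]
      congr 1
      rw [Nat.mul_comm q m, Nat.mul_add_div hm, Nat.div_eq_of_lt hr]
      omega
    · rw [PySem.Int.mod_natCast]
      congr 1
      rw [Nat.mul_comm q m, Nat.mul_add_mod, Nat.mod_eq_of_lt hr]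
  have hrowE : (List.range m).map
      ((fun k : Int =>
        ((PySem.List.pyGetD l1 (PySem.Int.floordiv k (m : Int)) 0,
          if PySem.Int.mod (PySem.Int.floordiv k (m : Int)) 2 == 1 then
            PySem.List.pyGetD l2 ((m : Int) - 1 - PySem.Int.mod k (m : Int)) 0
          else PySem.List.pyGetD l2 (PySem.Int.mod k (m : Int)) 0) : Int × Int))
        ∘ ((fun k : Nat => ((k : Nat) : Int)) ∘ fun r : Nat => q * m + r))
      = (List.range m).map (fun r =>
          (l1.getD q 0, if q % 2 = 1 then l2.getD (m - 1 - r) 0 else l2.getD r 0)) := by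
    refine List.map_congr_left ?_
    intro r hr
    have hrm : r < m := List.mem_range.mp hr
    obtain ⟨hdiv, hmod⟩ := hstep r hrm
    simp only [Function.comp_apply, hdiv, hmod, PySem.List.pyGetD_natCast]
    have hmodq : PySem.Int.mod ((q : Nat) : Int) 2 = ((q % 2 : Nat) : Int) := by
      exact_mod_cast PySem.Int.mod_natCast q 2
    have hcast : ((m : Nat) : Int) - 1 - ((r : Nat) : Int) = ((m - 1 - r : Nat) : Int) := by omega
    by_cases hodd : q % 2 = 1
    · rw [if_pos (by rw [hmodq, hodd]; rfl), if_pos hodd, hcast, PySem.List.pyGetD_natCast]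
    · rw [if_neg (by rw [hmodq]; simp; omega), if_neg hodd]
  rw [hrowE]
  by_cases hodd : q % 2 = 1
  · rw [if_pos hodd]
    calc (List.range m).map (fun r => (l1.getD q 0, if q % 2 = 1 then l2.getD (m - 1 - r) 0 else l2.getD r 0))
        = (List.range m).map (fun r => ((fun s => (l1.getD q 0, l2.getD s 0)) (m - 1 - r))) := by
          refine List.map_congr_left ?_
          intro r _
          rw [if_pos hodd]
      _ = ((List.range m).map (fun s => (l1.getD q 0, l2.getD s 0))).reverse :=
          map_range_mirror (fun s => (l1.getD q 0, l2.getD s 0)) m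
      _ = (l2.map (fun y => (l1.getD q 0, y))).reverse := by rw [hlen, map_getD_range]
  · rw [if_neg hodd]
    calc (List.range m).map (fun r => (l1.getD q 0, if q % 2 = 1 then l2.getD (m - 1 - r) 0 else l2.getD r 0))
        = (List.range m).map (fun r => (l1.getD q 0, l2.getD r 0)) := by
          refine List.map_congr_left ?_
          intro r _
          rw [if_neg hodd]
      _ = l2.map (fun y => (l1.getD q 0, y)) := by rw [hlen, map_getD_range]

-- ===== VERDICT (by name: the statement is the Claim_ definition above) =====
theorem zigzag_product_spec : Claim_equal_zigzag_product := by
  intro l1 l2 _ hpre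
  obtain ⟨hlen, hne⟩ := hpre
  unfold Spec_zigzag_product
  rw [A_eq_zig l1 l2 hlen hne, B_eq_zig l1 l2 hlen]

@[simp]
theorem zigzag_product_raises : Claim_raises_zigzag_product := by
  unfold Claim_raises_zigzag_product
  constructor
  · intro l1 l2 _ hr hpre
    exact hpre.2 hr.1
  · exact ⟨by decide, by decide, by decide⟩
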